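-- pv_equiv track=rewrite | github.com/miliar/Code_Jam_Webscraper | solutions_python/Problem_178/3511.py | solve
-- ===== SOURCE A (Python) =====
-- def solve(S):
--     top, S = S[0], S[1:]
--     if not S:
--         if top == '+':
--             return 0
--         else:
--             return 1
--     if top == S[0]:
--         return solve(S)
--     else:
--         return 1+solve(S)
-- ===== SOURCE B (Python) =====
-- def solve(S):
--     return sum(1 for a, b in zip(S, S[1:]) if a != b) + (0 if S[-1] == '+' else 1)
-- ===== Notes on version B (the rewrite author's own statement) =====
-- stated objective: simpler
-- what changed: Replaces the head-recursive block walk with a single iterative pass counting adjacent differing characters, plus 1 if the last character is not '+'.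
import Mathlib
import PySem

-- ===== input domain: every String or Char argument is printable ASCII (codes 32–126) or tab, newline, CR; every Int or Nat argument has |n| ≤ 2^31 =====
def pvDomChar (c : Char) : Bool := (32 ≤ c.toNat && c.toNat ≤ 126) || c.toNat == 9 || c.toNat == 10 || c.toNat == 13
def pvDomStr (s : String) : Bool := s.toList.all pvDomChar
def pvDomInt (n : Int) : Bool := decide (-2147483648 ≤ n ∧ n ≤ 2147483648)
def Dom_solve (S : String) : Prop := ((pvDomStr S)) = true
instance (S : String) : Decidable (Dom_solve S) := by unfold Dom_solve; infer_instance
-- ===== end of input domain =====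

-- B replaces A's head recursion with one iterative pass counting adjacent differing
-- characters plus a final-character check (objective: simpler). Both raise on "".

-- ===== PORT A =====
-- A recurses: peel top = S[0]; if rest empty, return 0 for '+' else 1; otherwise
-- add 1 when top differs from the next char. Transcribed as structural recursion
-- on the character list ([] is Python's IndexError case, excluded by Pre_solve).
def solveL : List Char → Int
  | [] => 0
  | [top] => if top = '+' then 0 else 1
  | top :: c :: rest => if top = c then solveL (c :: rest) else 1 + solveL (c :: rest)

def solve (S : String) : Int := solveL S.toList

-- ===== PORT B =====
-- sum(1 for a,b in zip(S, S[1:]) if a != b) + (0 if S[-1]=='+' else 1)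
def solve_alt (S : String) : Int :=
  let l := S.toList
  ((l.zip l.tail).foldl (fun acc p => if p.1 ≠ p.2 then acc + 1 else acc) 0)
    + (if l.getLast? = some '+' then 0 else 1)

-- ===== PRECONDITION & SPEC =====
-- Pre_ excludes only the empty string, on which Python A raises IndexError (S[0]).
def Pre_solve (S : String) : Prop := S.toList ≠ []
instance (S : String) : Decidable (Pre_solve S) := by unfold Pre_solve; infer_instance
def pvWitness_solve : String := "+-+"
def Spec_solve (S : String) (out : Int) : Prop := out = solve_alt S
instance (S : String) (out : Int) : Decidable (Spec_solve S out) := by unfold Spec_solve; infer_instance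

-- ===== CLAIM (what is proved, stated in full; the proofs are below) =====
def Claim_equal_solve : Prop := ∀ (S : String), Dom_solve S → Pre_solve S → Spec_solve S (solve S)

-- ===== LEMMAS AND PROOFS =====
theorem foldl_count_shift (zs : List (Char × Char)) (a : Int) :
    zs.foldl (fun acc p => if p.1 ≠ p.2 then acc + 1 else acc) a
      = a + zs.foldl (fun acc p => if p.1 ≠ p.2 then acc + 1 else acc) 0 := by
  induction zs generalizing a with
  | nil => simp
  | cons z zs ih =>
    simp only [List.foldl_cons]
    rw [ih, ih (if z.1 ≠ z.2 then (0:Int) + 1 else 0)]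
    split <;> omega

theorem solveL_eq (c : Char) (rest : List Char) :
    solveL (c :: rest)
      = (((c :: rest).zip rest).foldl (fun acc p => if p.1 ≠ p.2 then acc + 1 else acc) 0)
        + (if (c :: rest).getLast? = some '+' then 0 else 1) := by
  induction rest generalizing c with
  | nil => simp [solveL]
  | cons d rest ih =>
    simp only [solveL, List.zip_cons_cons, List.foldl_cons]
    rw [foldl_count_shift, ih d]
    have hlast : (c :: d :: rest).getLast? = (d :: rest).getLast? := by
      simp [List.getLast?_cons_cons]
    rw [hlast]
    by_cases h : c = d <;> simp [h] <;> omega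

-- ===== VERDICT (by name: the statement is the Claim_ definition above) =====
theorem solve_spec : Claim_equal_solve := by
  intro S _ hpre
  unfold Spec_solve solve solve_alt
  cases h : S.toList with
  | nil => exact absurd h hpre
  | cons c rest => simpa using solveL_eq c rest
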